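-- pv_equiv track=rewrite | github.com/HyunBin-Jang/Algorithm_Team5 | Minimizer-indexing/mapping_algor.py | reconstruct_genome_with_reads
-- ===== SOURCE A (Python) =====
-- def minimizer_match(
--     reference,index,read,
--     k=20,w=8,
--     max_mismatch=2,seed_min=2
-- ):
--     read_kmers = [read[i:i + k] for i in range(len(read) - k + 1)]
--     read_min_pairs = []
--     for i in range(len(read_kmers) - w + 1):
--         window = read_kmers[i:i + w]
--         mn = min(window)
--         mn_idx = window.index(mn)
--         read_pos = i + mn_idx
--         read_min_pairs.append((mn, read_pos))
--
--     delta_counts = {}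
--     for mn, rpos in read_min_pairs:
--         if mn not in index:
--             continue
--         for refpos in index[mn]:
--             delta = refpos - rpos
--             delta_counts[delta] = delta_counts.get(delta, 0) + 1
--
--     candidates = [d for d, cnt in delta_counts.items() if cnt >= seed_min]
--     best_pos, best_mm = -1, max_mismatch + 1
--
--     for delta in candidates:
--         if delta < 0 or delta + len(read) > len(reference):
--             continue
--         window_seq = reference[delta : delta + len(read)]
--         mismatches = sum(1 for a, b in zip(read, window_seq) if a != b)
--         if mismatches <= max_mismatch and mismatches < best_mm:
--             best_mm = mismatches
--             best_pos = delta
--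
--     return best_pos, best_mm
--
-- def reconstruct_genome_with_reads(
--     reference,
--     reads,
--     truth_positions,
--     index,
--     k=20, w=8, max_mismatch=2, seed_min=2
-- ):
--     reconstructed = list(reference)
--     matched_reads = 0
--     total_reads = len(reads)
--
--     for i, read in enumerate(reads):
--         true_pos = truth_positions[i]
--         pred_pos, mm = minimizer_match(
--             reference, index, read,
--             k=k, w=w, max_mismatch=max_mismatch, seed_min=seed_min
--         )
--         # mismatch 허용 범위에서 복원
--         if pred_pos == true_pos and mm <= max_mismatch:
--             for j, base in enumerate(read):
--                 reconstructed[pred_pos + j] = base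
--             matched_reads += 1
--
--     return ''.join(reconstructed), matched_reads, total_reads
-- ===== SOURCE B (Python) =====
-- def _min_pairs(kmers, w):
--     """(minimizer, position) per window, reusing the cached minimizer until it
--     falls out of the window; only then is the window rescanned."""
--     pairs = []
--     mn, pos = None, -1
--     for i in range(len(kmers) - w + 1):
--         if pos < i:
--             # cached minimizer expired: rescan the whole window
--             mn, pos = kmers[i], i
--             for m in range(i + 1, i + w):
--                 if kmers[m] < mn:
--                     mn, pos = kmers[m], m
--         else:
--             # only the entering k-mer can beat the cached minimizer
--             last = kmers[i + w - 1]
--             if last < mn: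
--                 mn, pos = last, i + w - 1
--         pairs.append((mn, pos))
--     return pairs
--
--
-- def _best_match(reference, index, read, k, w, max_mismatch, seed_min):
--     kmers = [read[i:i + k] for i in range(len(read) - k + 1)]
--     counts = {}
--     for mn, rpos in _min_pairs(kmers, w):
--         for refpos in index.get(mn, ()):
--             d = refpos - rpos
--             counts[d] = counts.get(d, 0) + 1
--     best_pos, best_mm = -1, max_mismatch + 1
--     for delta, cnt in counts.items():
--         if cnt >= seed_min and 0 <= delta and delta + len(read) <= len(reference):
--             mm = sum(a != b for a, b in zip(read, reference[delta:delta + len(read)]))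
--             if mm < best_mm:  # best_mm never exceeds max_mismatch + 1
--                 best_pos, best_mm = delta, mm
--     return best_pos, best_mm
--
--
-- def reconstruct_genome_with_reads(
--     reference,
--     reads,
--     truth_positions,
--     index,
--     k=20, w=8, max_mismatch=2, seed_min=2
-- ):
--     out = list(reference)
--     matched = 0
--     for read, tpos in zip(reads, truth_positions):
--         pos, mm = _best_match(reference, index, read, k, w, max_mismatch, seed_min)
--         if pos == tpos and mm <= max_mismatch:
--             out[pos:pos + len(read)] = read
--             matched += 1
--     return ''.join(out), matched, len(reads)
-- ===== Notes on version B (the rewrite author's own statement) =====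
-- stated objective: alternative
-- what changed: A rescans every length-w window of k-mers from scratch (slice, min(), .index()) to find each minimizer; B keeps the previous window's minimizer and compares only the one entering k-mer, rescanning a window only when the cached minimizer falls out of it, and fuses the candidate filter into one pass over the delta counts.
import Mathlib
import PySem

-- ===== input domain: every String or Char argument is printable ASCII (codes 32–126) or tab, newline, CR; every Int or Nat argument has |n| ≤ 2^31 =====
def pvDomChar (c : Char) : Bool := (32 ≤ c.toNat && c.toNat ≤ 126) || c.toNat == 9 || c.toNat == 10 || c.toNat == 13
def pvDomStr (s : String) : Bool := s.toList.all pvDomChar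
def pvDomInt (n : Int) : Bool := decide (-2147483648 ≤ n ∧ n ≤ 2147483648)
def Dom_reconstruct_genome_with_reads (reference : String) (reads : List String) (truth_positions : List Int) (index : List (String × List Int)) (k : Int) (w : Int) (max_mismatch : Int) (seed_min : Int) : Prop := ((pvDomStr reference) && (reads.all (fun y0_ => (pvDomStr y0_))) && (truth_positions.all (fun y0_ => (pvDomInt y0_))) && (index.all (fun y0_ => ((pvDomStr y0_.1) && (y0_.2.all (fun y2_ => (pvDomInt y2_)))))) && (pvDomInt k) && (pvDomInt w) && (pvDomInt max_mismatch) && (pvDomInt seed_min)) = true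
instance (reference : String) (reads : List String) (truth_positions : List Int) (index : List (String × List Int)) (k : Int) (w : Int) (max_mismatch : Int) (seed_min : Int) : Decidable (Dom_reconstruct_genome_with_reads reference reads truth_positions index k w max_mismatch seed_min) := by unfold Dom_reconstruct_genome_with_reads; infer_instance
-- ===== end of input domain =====

-- B replaces A's per-window slice+min+index minimizer scan by a cached minimizer that is
-- rescanned only when it falls out of the window (objective: alternative).

-- ===== PORT A =====
-- Python strings are modelled as List Char throughout (Python's str '<' is Lean's '<' on List Char).

-- read_kmers = [read[i:i+k] for i in range(len(read)-k+1)]   (shared line of both Pythons)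
def pvKmers (read : List Char) (k : Int) : List (List Char) :=
  (PySem.List.pyRange 0 ((read.length : Int) - k + 1)).map
    (fun i => PySem.List.slice read (some i) (some (i + k)))

-- mismatches = sum(1 for a, b in zip(read, window_seq) if a != b)   (identical in both Pythons)
def pvMismatches (read window_seq : List Char) : Int :=
  (((read.zip window_seq).countP (fun ab => ab.1 != ab.2) : Nat) : Int)

-- body of A's first loop: window = read_kmers[i:i+w]; mn = min(window); read_pos = i + window.index(mn)
def pvWindowStep (kmers : List (List Char)) (w : Int)
    (acc : List (List Char × Int)) (i : Int) : List (List Char × Int) :=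
  let window := PySem.List.slice kmers (some i) (some (i + w))
  match PySem.List.min? window (fun x => x) with
  | none => acc    -- Python: min([]) raises ValueError; excluded by Pre_
  | some mn => acc ++ [(mn, i + (((PySem.List.index? window mn).getD 0 : Nat) : Int))]

-- body of A's delta-count loop (membership test, then index[mn])
def pvCountStepA (index : PySem.Dict (List Char) (List Int))
    (d : PySem.Dict Int Int) (p : List Char × Int) : PySem.Dict Int Int :=
  match index.get? p.1 with
  | none => d
  | some refposs => refposs.foldl (fun d refpos =>
      d.insert (refpos - p.2) (d.getD (refpos - p.2) 0 + 1)) d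

-- body of A's candidate loop
def pvSelectStepA (reference read : List Char) (max_mismatch : Int)
    (best : Int × Int) (delta : Int) : Int × Int :=
  if delta < 0 ∨ (reference.length : Int) < delta + (read.length : Int) then best
  else
    let window_seq := PySem.List.slice reference (some delta) (some (delta + (read.length : Int)))
    let mismatches := pvMismatches read window_seq
    if mismatches ≤ max_mismatch ∧ mismatches < best.2 then (delta, mismatches) else best

def pvMinimizerMatch (reference : List Char) (index : PySem.Dict (List Char) (List Int))
    (read : List Char) (k w max_mismatch seed_min : Int) : Int × Int :=
  let read_kmers := pvKmers read k
  let read_min_pairs :=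
    (PySem.List.pyRange 0 ((read_kmers.length : Int) - w + 1)).foldl (pvWindowStep read_kmers w) []
  let delta_counts := read_min_pairs.foldl (pvCountStepA index) PySem.Dict.empty
  let candidates := (delta_counts.items.filter (fun p => seed_min ≤ p.2)).map (·.1)
  candidates.foldl (pvSelectStepA reference read max_mismatch) (-1, max_mismatch + 1)

-- reconstructed[pred_pos + j] = base  for j, base in enumerate(read)
def pvWriteA (pred_pos : Int) (read : List Char) (rec : List Char) : List Char :=
  (PySem.List.enumerate read 0).foldl (fun r q => PySem.List.pySetD r (pred_pos + q.1) q.2) rec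

-- body of A's main loop (st = (reconstructed, matched_reads); p = (i, read))
def pvStepA (refL : List Char) (idx : PySem.Dict (List Char) (List Int))
    (truth_positions : List Int) (k w max_mismatch seed_min : Int)
    (st : List Char × Int) (p : Int × String) : List Char × Int :=
  let true_pos := PySem.List.pyGetD truth_positions p.1 0   -- truth_positions[i]; in range under Pre_
  let r := pvMinimizerMatch refL idx p.2.toList k w max_mismatch seed_min
  if r.1 = true_pos ∧ r.2 ≤ max_mismatch then (pvWriteA r.1 p.2.toList st.1, st.2 + 1) else st

def reconstruct_genome_with_reads (reference : String) (reads : List String) (truth_positions : List Int) (index : List (String × List Int)) (k : Int) (w : Int) (max_mismatch : Int) (seed_min : Int) : String × Int × Int :=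
  let refL := reference.toList
  let idx : PySem.Dict (List Char) (List Int) :=
    PySem.Dict.ofList (index.map (fun p => (p.1.toList, p.2)))
  let st := (PySem.List.enumerate reads 0).foldl
    (pvStepA refL idx truth_positions k w max_mismatch seed_min) (refL, 0)
  (String.mk st.1, st.2, (reads.length : Int))

-- ===== PORT B =====

-- B's rescan of the window [i, i+w) of kmers: running leftmost minimum
def pvRescan (kmers : List (List Char)) (i w : Int) : List Char × Int :=
  (PySem.List.pyRange (i + 1) (i + w)).foldl
    (fun st m =>
      let km := PySem.List.pyGetD kmers m []
      if km < st.1 then (km, m) else st)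
    (PySem.List.pyGetD kmers i [], i)

-- body of B's window loop: keep the cached minimizer unless it expired
def pvPairStepB (kmers : List (List Char)) (w : Int)
    (st : (List Char × Int) × List (List Char × Int)) (i : Int) :
    (List Char × Int) × List (List Char × Int) :=
  let cur :=
    if st.1.2 < i then pvRescan kmers i w
    else
      let last := PySem.List.pyGetD kmers (i + w - 1) []
      if last < st.1.1 then (last, i + w - 1) else st.1
  (cur, st.2 ++ [cur])

def pvMinPairs (kmers : List (List Char)) (w : Int) : List (List Char × Int) :=
  -- initial state (mn, pos) = (None, -1); [] is a placeholder the loop never reads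
  ((PySem.List.pyRange 0 ((kmers.length : Int) - w + 1)).foldl
    (pvPairStepB kmers w) (([], -1), [])).2

-- body of B's counting loop: for refpos in index.get(mn, ())
def pvCountStepB (index : PySem.Dict (List Char) (List Int))
    (d : PySem.Dict Int Int) (p : List Char × Int) : PySem.Dict Int Int :=
  ((index.get? p.1).getD []).foldl (fun d refpos =>
    d.insert (refpos - p.2) (d.getD (refpos - p.2) 0 + 1)) d

-- body of B's fused selection loop over counts.items()
def pvSelectStepB (reference read : List Char) (seed_min : Int)
    (best : Int × Int) (pr : Int × Int) : Int × Int :=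
  if seed_min ≤ pr.2 ∧ 0 ≤ pr.1 ∧ pr.1 + (read.length : Int) ≤ (reference.length : Int) then
    let mm := pvMismatches read
      (PySem.List.slice reference (some pr.1) (some (pr.1 + (read.length : Int))))
    if mm < best.2 then (pr.1, mm) else best
  else best

def pvBestMatch (reference : List Char) (index : PySem.Dict (List Char) (List Int))
    (read : List Char) (k w max_mismatch seed_min : Int) : Int × Int :=
  let kmers := pvKmers read k
  let counts := (pvMinPairs kmers w).foldl (pvCountStepB index) PySem.Dict.empty
  counts.items.foldl (pvSelectStepB reference read seed_min) (-1, max_mismatch + 1)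

-- body of B's main loop (p = (read, tpos)); out[pos:pos+len(read)] = read is exact as
-- take/append/drop because 0 ≤ pos ∧ pos + len(read) ≤ len(out) whenever the branch is taken
def pvStepB (refL : List Char) (idx : PySem.Dict (List Char) (List Int))
    (k w max_mismatch seed_min : Int)
    (st : List Char × Int) (p : String × Int) : List Char × Int :=
  let r := pvBestMatch refL idx p.1.toList k w max_mismatch seed_min
  if r.1 = p.2 ∧ r.2 ≤ max_mismatch then
    (st.1.take r.1.toNat ++ p.1.toList ++ st.1.drop (r.1.toNat + p.1.toList.length), st.2 + 1)
  else st

def reconstruct_genome_with_reads_alt (reference : String) (reads : List String) (truth_positions : List Int) (index : List (String × List Int)) (k : Int) (w : Int) (max_mismatch : Int) (seed_min : Int) : String × Int × Int :=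
  let refL := reference.toList
  let idx : PySem.Dict (List Char) (List Int) :=
    PySem.Dict.ofList (index.map (fun p => (p.1.toList, p.2)))
  let st := (reads.zip truth_positions).foldl
    (pvStepB refL idx k w max_mismatch seed_min) (refL, 0)
  (String.mk st.1, st.2, (reads.length : Int))

-- ===== PRECONDITION & SPEC =====
-- Pre_ excludes exactly the inputs on which A raises: truth_positions shorter than reads
-- (IndexError at truth_positions[i]) and, for a nonempty read list, w ≤ 0 (min() of an
-- empty window raises ValueError).
def Pre_reconstruct_genome_with_reads (reference : String) (reads : List String) (truth_positions : List Int) (index : List (String × List Int)) (k : Int) (w : Int) (max_mismatch : Int) (seed_min : Int) : Prop :=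
  reads.length ≤ truth_positions.length ∧ (reads = [] ∨ 1 ≤ w)
instance (reference : String) (reads : List String) (truth_positions : List Int) (index : List (String × List Int)) (k : Int) (w : Int) (max_mismatch : Int) (seed_min : Int) : Decidable (Pre_reconstruct_genome_with_reads reference reads truth_positions index k w max_mismatch seed_min) := by unfold Pre_reconstruct_genome_with_reads; infer_instance

def pvWitness_reconstruct_genome_with_reads : String × List String × List Int × (List (String × List Int)) × Int × Int × Int × Int :=
  ("ACGT", ["AC"], [0], [("AC", [0])], 2, 1, 2, 1)

def Spec_reconstruct_genome_with_reads (reference : String) (reads : List String) (truth_positions : List Int) (index : List (String × List Int)) (k : Int) (w : Int) (max_mismatch : Int) (seed_min : Int) (out : String × Int × Int) : Prop := out = reconstruct_genome_with_reads_alt reference reads truth_positions index k w max_mismatch seed_min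
instance (reference : String) (reads : List String) (truth_positions : List Int) (index : List (String × List Int)) (k : Int) (w : Int) (max_mismatch : Int) (seed_min : Int) (out : String × Int × Int) : Decidable (Spec_reconstruct_genome_with_reads reference reads truth_positions index k w max_mismatch seed_min out) := by unfold Spec_reconstruct_genome_with_reads; infer_instance

-- ===== CLAIM (what is proved, stated in full; the proofs are below) =====
def Claim_equal_reconstruct_genome_with_reads : Prop := ∀ (reference : String) (reads : List String) (truth_positions : List Int) (index : List (String × List Int)) (k : Int) (w : Int) (max_mismatch : Int) (seed_min : Int), Dom_reconstruct_genome_with_reads reference reads truth_positions index k w max_mismatch seed_min → Pre_reconstruct_genome_with_reads reference reads truth_positions index k w max_mismatch seed_min → Spec_reconstruct_genome_with_reads reference reads truth_positions index k w max_mismatch seed_min (reconstruct_genome_with_reads reference reads truth_positions index k w max_mismatch seed_min)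
-- ===== LEMMAS AND PROOFS =====

-- (mn, pos) is the value and position of the LEFTMOST minimum of kmers over the window [i, i+w)
def IsLAM (kmers : List (List Char)) (i w : Int) (s : List Char × Int) : Prop :=
  i ≤ s.2 ∧ s.2 < i + w ∧ PySem.List.pyGetD kmers s.2 [] = s.1 ∧
  (∀ t, i ≤ t → t < s.2 → s.1 < PySem.List.pyGetD kmers t []) ∧
  (∀ t, s.2 ≤ t → t < i + w → s.1 ≤ PySem.List.pyGetD kmers t [])

lemma pyRange_one_nil {a b : Int} (h : b ≤ a) : PySem.List.pyRange a b = [] := by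
  rw [List.eq_nil_iff_forall_not_mem]
  intro x hx; rw [PySem.List.mem_pyRange_one] at hx; omega

lemma pvDecLTBridge : ((fun (a b : List Char) => a.decidableLT b) : DecidableLT (List Char)) = LinearOrder.toDecidableLT := by
  funext a b; exact Subsingleton.elim _ _

lemma isLAM_unique {kmers : List (List Char)} {i w : Int} {s s' : List Char × Int}
    (h : IsLAM kmers i w s) (h' : IsLAM kmers i w s') : s = s' := by
  obtain ⟨h1, h2, h3, h4, h5⟩ := h
  obtain ⟨g1, g2, g3, g4, g5⟩ := h'
  rcases lt_trichotomy s.2 s'.2 with hlt | heq | hgt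
  · have a1 : s'.1 < PySem.List.pyGetD kmers s.2 [] := g4 s.2 h1 hlt
    have a2 : s.1 ≤ PySem.List.pyGetD kmers s'.2 [] := h5 s'.2 (le_of_lt hlt) g2
    rw [h3] at a1; rw [g3] at a2
    exact absurd (lt_of_le_of_lt a2 a1) (lt_irrefl _)
  · have : s.1 = s'.1 := by rw [← h3, ← g3, heq]
    exact Prod.ext this heq
  · have a1 : s.1 < PySem.List.pyGetD kmers s'.2 [] := h4 s'.2 g1 hgt
    have a2 : s'.1 ≤ PySem.List.pyGetD kmers s.2 [] := g5 s.2 (le_of_lt hgt) h2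
    rw [g3] at a1; rw [h3] at a2
    exact absurd (lt_of_le_of_lt a2 a1) (lt_irrefl _)

def PLAM (kmers : List (List Char)) (i hi : Int) (s : List Char × Int) : Prop :=
  i ≤ s.2 ∧ s.2 < hi ∧ PySem.List.pyGetD kmers s.2 [] = s.1 ∧
  (∀ t, i ≤ t → t < s.2 → s.1 < PySem.List.pyGetD kmers t []) ∧
  (∀ t, s.2 ≤ t → t < hi → s.1 ≤ PySem.List.pyGetD kmers t [])

lemma plam_step {kmers : List (List Char)} {i a : Int} {s : List Char × Int}
    (h : PLAM kmers i a s) (ha : i < a) :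
    PLAM kmers i (a + 1)
      (if PySem.List.pyGetD kmers a [] < s.1 then (PySem.List.pyGetD kmers a [], a) else s) := by
  obtain ⟨h1, h2, h3, h4, h5⟩ := h
  by_cases hc : PySem.List.pyGetD kmers a [] < s.1
  · rw [if_pos hc]
    refine ⟨by omega, by omega, rfl, ?_, ?_⟩
    · intro t ht1 ht2
      rcases lt_trichotomy t s.2 with b1 | b2 | b3
      · exact lt_trans hc (h4 t ht1 b1)
      · rw [b2, h3]; exact hc
      · exact lt_of_lt_of_le hc (h5 t (by omega) (by omega))
    · intro t ht1 ht2
      have : t = a := by omega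
      rw [this]
  · rw [if_neg hc]
    refine ⟨h1, by omega, h3, h4, ?_⟩
    intro t ht1 ht2
    by_cases he : t = a
    · rw [he]; exact le_of_not_gt hc
    · exact h5 t ht1 (by omega)

lemma plam_fold (kmers : List (List Char)) (i : Int) :
    ∀ (n : Nat) (a : Int) (s : List Char × Int), i < a → PLAM kmers i a s →
    PLAM kmers i (a + n)
      ((PySem.List.pyRange a (a + n)).foldl
        (fun st m =>
          let km := PySem.List.pyGetD kmers m []
          if km < st.1 then (km, m) else st) s) := by
  intro n
  induction n with
  | zero => intro a s ha hs; rw [pyRange_one_nil (by omega)]; simpa using hs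
  | succ m ih =>
    intro a s ha hs
    rw [PySem.List.pyRange_one_cons (by omega)]
    simp only [List.foldl_cons]
    have h1 := plam_step hs ha
    have h2 := ih (a + 1) _ (by omega) h1
    have e : a + ((m+1 : Nat) : Int) = a + 1 + (m : Nat) := by push_cast; ring
    rw [e]
    exact h2

lemma rescan_isLAM (kmers : List (List Char)) (i w : Int) (hw : 1 ≤ w) :
    IsLAM kmers i w (pvRescan kmers i w) := by
  have base : PLAM kmers i (i + 1) (PySem.List.pyGetD kmers i [], i) := by
    refine ⟨le_refl _, by omega, rfl, ?_, ?_⟩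
    · intro t ht1 ht2; omega
    · intro t ht1 ht2
      have : t = i := by omega
      rw [this]
  have h := plam_fold kmers i (w - 1).toNat (i + 1) _ (by omega) base
  rw [show (i + 1) + ((w-1).toNat : Int) = i + w by omega] at h
  unfold pvRescan
  exact h

lemma step_isLAM {kmers : List (List Char)} {i w : Int} {s : List Char × Int}
    (h : IsLAM kmers i w s) (hp : i + 1 ≤ s.2) (hw : 1 ≤ w) :
    IsLAM kmers (i + 1) w
      (if PySem.List.pyGetD kmers (i + w) [] < s.1
       then (PySem.List.pyGetD kmers (i + w) [], i + w) else s) := by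
  obtain ⟨h1, h2, h3, h4, h5⟩ := h
  by_cases hc : PySem.List.pyGetD kmers (i + w) [] < s.1
  · rw [if_pos hc]
    refine ⟨by omega, by omega, rfl, ?_, ?_⟩
    · intro t ht1 ht2
      rcases lt_trichotomy t s.2 with b1 | b2 | b3
      · exact lt_trans hc (h4 t (by omega) b1)
      · rw [b2, h3]; exact hc
      · exact lt_of_lt_of_le hc (h5 t (by omega) (by omega))
    · intro t ht1 ht2
      have : t = i + w := by omega
      rw [this]
  · rw [if_neg hc]
    refine ⟨hp, by omega, h3, fun t ht1 ht2 => h4 t (by omega) ht2, ?_⟩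
    intro t ht1 ht2
    by_cases he : t = i + w
    · rw [he]; exact le_of_not_gt hc
    · exact h5 t ht1 (by omega)






lemma windowStep_eq (kmers : List (List Char)) (w i : Int) (hw : 1 ≤ w)
    (hi : 0 ≤ i) (hiw : i + w ≤ (kmers.length : Int)) (acc : List (List Char × Int)) :
    pvWindowStep kmers w acc i = acc ++ [pvRescan kmers i w] := by
  unfold pvWindowStep
  set window := PySem.List.slice kmers (some i) (some (i + w)) with hwdef
  have hwin : window = (kmers.drop i.toNat).take w.toNat := by
    rw [hwdef, PySem.List.slice_toNat kmers hi (by omega)]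
    congr 1; omega
  have hlen : window.length = w.toNat := by
    rw [hwin]; simp; omega
  have hget : ∀ (j : Nat), j < w.toNat → window[j]? = some (PySem.List.pyGetD kmers (i + j) []) := by
    intro j hj
    have hb : i.toNat + j < kmers.length := by omega
    have h1 : window[j]? = kmers[i.toNat + j]? := by
      rw [hwin, List.getElem?_take, if_pos hj, List.getElem?_drop]
    rw [h1, List.getElem?_eq_getElem hb]
    congr 1
    rw [PySem.List.pyGetD_eq_getElem kmers [] (by omega) (by push_cast; omega)]
    congr 1; omega
  cases hmn : PySem.List.min? window (fun x => x) with
  | none =>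
    exfalso
    have := (PySem.List.min?_eq_none_iff window (fun x => x)).mp hmn
    rw [this] at hlen; simp at hlen; omega
  | some mn =>
    have hmem : mn ∈ window := PySem.List.min?_mem hmn
    have hmin : ∀ y ∈ window, mn ≤ y := by
      rw [pvDecLTBridge] at hmn
      exact PySem.List.min?_isMin hmn
    have hidx : (PySem.List.index? window mn).isSome := by
      rw [PySem.List.index?_isSome_iff]; exact hmem
    obtain ⟨j, hj⟩ := Option.isSome_iff_exists.mp hidx
    obtain ⟨hjlt, hj1, hj2⟩ := PySem.List.getElem_of_index?_eq_some hj
    have hjw : j < w.toNat := by omega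
    have hlam : IsLAM kmers i w (mn, i + (j : Int)) := by
      refine ⟨by omega, by omega, ?_, ?_, ?_⟩
      · have := hget j hjw
        rw [List.getElem?_eq_getElem hjlt, hj1] at this
        exact (Option.some_inj.mp this).symm
      · intro t ht1 ht2
        have hu : (t - i).toNat < j := by omega
        have huw : (t - i).toNat < w.toNat := by omega
        have hgt := hget (t - i).toNat huw
        rw [show i + ((t - i).toNat : Int) = t by omega] at hgt
        have hne : window[(t - i).toNat]'(by omega) ≠ mn := hj2 _ hu
        have hle : mn ≤ window[(t - i).toNat]'(by omega) := hmin _ (List.getElem_mem _)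
        have : window[(t - i).toNat]'(by omega) = PySem.List.pyGetD kmers t [] := by
          rw [List.getElem?_eq_getElem (by omega)] at hgt
          exact Option.some_inj.mp hgt
        rw [← this]
        exact lt_of_le_of_ne hle (Ne.symm hne)
      · intro t ht1 ht2
        have huw : (t - i).toNat < w.toNat := by omega
        have hgt := hget (t - i).toNat huw
        rw [show i + ((t - i).toNat : Int) = t by omega] at hgt
        have : window[(t - i).toNat]'(by omega) = PySem.List.pyGetD kmers t [] := by
          rw [List.getElem?_eq_getElem (by omega)] at hgt
          exact Option.some_inj.mp hgt
        rw [← this]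
        exact hmin _ (List.getElem_mem _)
    have heq : (mn, i + (j : Int)) = pvRescan kmers i w :=
      isLAM_unique hlam (rescan_isLAM kmers i w hw)
    simp only [hmn, hj, Option.getD_some]
    rw [← heq]

lemma pairsB_loop (kmers : List (List Char)) (w : Int) (hw : 1 ≤ w) :
    ∀ (c a : Int) (cur : List Char × Int) (pairs : List (List Char × Int)),
    (cur.2 < a ∨ IsLAM kmers (a - 1) w cur) →
    ((PySem.List.pyRange a c).foldl (pvPairStepB kmers w) (cur, pairs)).2 =
      pairs ++ (PySem.List.pyRange a c).map (fun i => pvRescan kmers i w) := by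
  have aux : ∀ (n : Nat) (a : Int) (cur : List Char × Int) (pairs : List (List Char × Int)),
      (cur.2 < a ∨ IsLAM kmers (a - 1) w cur) →
      ((PySem.List.pyRange a (a + n)).foldl (pvPairStepB kmers w) (cur, pairs)).2 =
        pairs ++ (PySem.List.pyRange a (a + n)).map (fun i => pvRescan kmers i w) := by
    intro n
    induction n with
    | zero => intro a cur pairs _; rw [pyRange_one_nil (by omega)]; simp
    | succ m ih =>
      intro a cur pairs hinv
      rw [PySem.List.pyRange_one_cons (by omega)]
      simp only [List.foldl_cons, List.map_cons]
      have hcur : pvPairStepB kmers w (cur, pairs) a = (pvRescan kmers a w, pairs ++ [pvRescan kmers a w]) := by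
        unfold pvPairStepB
        dsimp only
        by_cases hlt : cur.2 < a
        · rw [if_pos hlt]
        · rw [if_neg hlt]
          rcases hinv with h | h
          · exact absurd h hlt
          · have hstep := step_isLAM h (by omega) hw
            rw [show a - 1 + 1 = a by ring, show a - 1 + w = a + w - 1 by ring] at hstep
            have := isLAM_unique hstep (rescan_isLAM kmers a w hw)
            rw [this]
      rw [hcur]
      have e : a + ((m + 1 : Nat) : Int) = (a + 1) + (m : Nat) := by push_cast; ring
      rw [e]
      rw [ih (a + 1) (pvRescan kmers a w) (pairs ++ [pvRescan kmers a w])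
        (Or.inr (by rw [show a + 1 - 1 = a by ring]; exact rescan_isLAM kmers a w hw))]
      simp
  intro c a cur pairs hinv
  by_cases hac : c ≤ a
  · rw [pyRange_one_nil hac]; simp
  · have e : c = a + ((c - a).toNat : Int) := by omega
    rw [e]
    exact aux (c - a).toNat a cur pairs hinv

-- both ports produce the same (minimizer, position) list
lemma pairs_eq (kmers : List (List Char)) (w : Int) (hw : 1 ≤ w) :
    (PySem.List.pyRange 0 ((kmers.length : Int) - w + 1)).foldl (pvWindowStep kmers w) [] =
      pvMinPairs kmers w := by
  have hA : (PySem.List.pyRange 0 ((kmers.length : Int) - w + 1)).foldl (pvWindowStep kmers w) [] =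
      (PySem.List.pyRange 0 ((kmers.length : Int) - w + 1)).foldl
        (fun acc i => acc ++ [pvRescan kmers i w]) [] := by
    apply PySem.List.foldl_congr_mem
    intro acc i hi
    rw [PySem.List.mem_pyRange_one] at hi
    exact windowStep_eq kmers w i hw hi.1 (by omega) acc
  rw [hA, PySem.List.foldl_append_singleton_eq_map]
  unfold pvMinPairs
  rw [pairsB_loop kmers w hw _ 0 ([], -1) [] (Or.inl (by norm_num))]

lemma counts_eq (index : PySem.Dict (List Char) (List Int)) (pairs : List (List Char × Int)) :
    pairs.foldl (pvCountStepA index) PySem.Dict.empty =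
      pairs.foldl (pvCountStepB index) PySem.Dict.empty := by
  have h : pvCountStepA index = pvCountStepB index := by
    funext d p
    unfold pvCountStepA pvCountStepB
    cases h : index.get? p.1 <;> simp [h]
  rw [h]

lemma select_eq (reference read : List Char) (max_mismatch seed_min : Int) :
    ∀ (items : List (Int × Int)) (b : Int × Int), b.2 ≤ max_mismatch + 1 →
    ((items.filter (fun p => seed_min ≤ p.2)).map (·.1)).foldl
        (pvSelectStepA reference read max_mismatch) b =
      items.foldl (pvSelectStepB reference read seed_min) b := by
  intro items
  induction items with
  | nil => intro b _; rfl
  | cons pr items ih =>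
    intro b hb
    by_cases hs : seed_min ≤ pr.2
    · simp only [List.filter_cons, hs, decide_true, List.map_cons, List.foldl_cons, if_true]
      have hstep : pvSelectStepA reference read max_mismatch b pr.1 =
          pvSelectStepB reference read seed_min b pr := by
        simp only [pvSelectStepA, pvSelectStepB]
        split_ifs <;> first | rfl | (exfalso; omega)
      rw [hstep]
      apply ih
      simp only [pvSelectStepB]
      split_ifs <;> (try dsimp only) <;> omega
    · simp only [List.filter_cons, hs, decide_false, List.foldl_cons, if_false]
      rw [show pvSelectStepB reference read seed_min b pr = b by
        unfold pvSelectStepB; rw [if_neg (by intro h; exact hs h.1)]] at *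
      exact ih b hb

lemma match_eq (reference : List Char) (index : PySem.Dict (List Char) (List Int))
    (read : List Char) (k w max_mismatch seed_min : Int) (hw : 1 ≤ w) :
    pvMinimizerMatch reference index read k w max_mismatch seed_min =
      pvBestMatch reference index read k w max_mismatch seed_min := by
  unfold pvMinimizerMatch pvBestMatch
  dsimp only
  rw [pairs_eq _ _ hw, counts_eq]
  rw [select_eq reference read max_mismatch seed_min _ _ (le_refl _)]

-- whenever the match reports ≤ max_mismatch mismatches, its position is a valid window
lemma match_bounds (reference : List Char) (index : PySem.Dict (List Char) (List Int))
    (read : List Char) (k w max_mismatch seed_min : Int) :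
    (pvBestMatch reference index read k w max_mismatch seed_min).2 ≤ max_mismatch →
    0 ≤ (pvBestMatch reference index read k w max_mismatch seed_min).1 ∧
    (pvBestMatch reference index read k w max_mismatch seed_min).1 + (read.length : Int) ≤ (reference.length : Int) := by
  have aux : ∀ (items : List (Int × Int)) (b : Int × Int),
      b.2 ≤ max_mismatch + 1 → (b.2 ≤ max_mismatch → 0 ≤ b.1 ∧ b.1 + (read.length : Int) ≤ (reference.length : Int)) →
      (items.foldl (pvSelectStepB reference read seed_min) b).2 ≤ max_mismatch + 1 ∧
      ((items.foldl (pvSelectStepB reference read seed_min) b).2 ≤ max_mismatch →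
        0 ≤ (items.foldl (pvSelectStepB reference read seed_min) b).1 ∧
        (items.foldl (pvSelectStepB reference read seed_min) b).1 + (read.length : Int) ≤ (reference.length : Int)) := by
    intro items
    induction items with
    | nil => intro b h1 h2; exact ⟨h1, h2⟩
    | cons pr items ih =>
      intro b h1 h2
      simp only [List.foldl_cons]
      apply ih
      · simp only [pvSelectStepB]; split_ifs <;> (try dsimp only) <;> omega
      · simp only [pvSelectStepB]
        split_ifs with hc1 hc2 <;> (try dsimp only) <;> intro hm
        · omega
        · exact h2 hm
        · exact h2 hm
  intro h
  unfold pvBestMatch at h ⊢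
  dsimp only at h ⊢
  exact (aux _ (-1, max_mismatch + 1) (le_refl _) (by omega)).2 h

lemma enumerate_shift {α : Type} (xs : List α) (s t : Int) :
    PySem.List.enumerate xs (s + t) = (PySem.List.enumerate xs s).map (fun p => (p.1 + t, p.2)) := by
  induction xs generalizing s with
  | nil => simp [PySem.List.enumerate_nil]
  | cons x xs ih =>
    rw [PySem.List.enumerate_cons, PySem.List.enumerate_cons]
    simp only [List.map_cons]
    rw [show s + t + 1 = s + 1 + t by ring, ih (s+1)]

lemma write_eq (read : List Char) :
    ∀ (p : Nat) (rec : List Char), p + read.length ≤ rec.length →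
    pvWriteA (p : Int) read rec = rec.take p ++ read ++ rec.drop (p + read.length) := by
  induction read with
  | nil =>
    intro p rec h
    simp [pvWriteA, PySem.List.enumerate_nil]
  | cons c cs ih =>
    intro p rec h
    unfold pvWriteA
    rw [PySem.List.enumerate_cons]
    simp only [List.foldl_cons]
    have h1 : PySem.List.pySetD rec ((p:Int) + 0) c = rec.set p c := by
      rw [show (p:Int) + 0 = (p:Int) by ring, PySem.List.pySetD_natCast]
    rw [h1]
    rw [show (0:Int) + 1 = 0 + (1:Int) by ring, enumerate_shift cs 0 1, List.foldl_map]
    have h2 : (fun (r : List Char) (q : Int × Char) => PySem.List.pySetD r ((p:Int) + (q.1 + 1)) q.2)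
        = (fun (r : List Char) (q : Int × Char) => PySem.List.pySetD r (((p+1 : Nat):Int) + q.1) q.2) := by
      funext r q; congr 1; push_cast; ring
    rw [h2]
    have h3 := ih (p+1) (rec.set p c) (by simp at h ⊢; omega)
    unfold pvWriteA at h3
    rw [h3]
    have hp : p < rec.length := by simp at h; omega
    rw [List.set_eq_take_append_cons_drop, if_pos hp]
    simp only [List.length_cons]
    rw [List.take_append, List.drop_append]
    have hl : (List.take p rec).length = p := by simp; omega
    rw [hl]
    have e2 : List.drop (p + 1 + cs.length) (List.take p rec) = [] := by
      apply List.drop_eq_nil_of_le; simp; omega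
    have e3 : p + 1 + cs.length - p = cs.length + 1 := by omega
    have e4 : p + 1 - p = 1 := by omega
    rw [e2, e3, e4, List.drop_succ_cons, List.drop_drop]
    simp
    have e1 : List.take (p+1) (List.take p rec) = List.take p rec := by
      rw [List.take_take]; congr 1; omega
    have e5 : p + 1 + cs.length = p + (cs.length + 1) := by omega
    rw [e1, e5]

lemma main_loop_eq (refL : List Char) (idx : PySem.Dict (List Char) (List Int))
    (k w max_mismatch seed_min : Int) (hw : 1 ≤ w) :
    ∀ (rs : List String) (ts : List Int) (rec : List Char) (cnt : Int),
    rs.length ≤ ts.length → rec.length = refL.length →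
    (PySem.List.enumerate rs 0).foldl (pvStepA refL idx ts k w max_mismatch seed_min) (rec, cnt) =
      (rs.zip ts).foldl (pvStepB refL idx k w max_mismatch seed_min) (rec, cnt) := by
  intro rs
  induction rs with
  | nil => intro ts rec cnt _ _; rfl
  | cons r rs ih =>
    intro ts rec cnt hlen hrec
    match ts with
    | [] => simp at hlen
    | t :: ts' =>
      rw [PySem.List.enumerate_cons, List.zip_cons_cons]
      simp only [List.foldl_cons]
      -- the first step of both loops agrees
      have hstep : pvStepA refL idx (t :: ts') k w max_mismatch seed_min (rec, cnt) (0, r) =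
          pvStepB refL idx k w max_mismatch seed_min (rec, cnt) (r, t) := by
        unfold pvStepA pvStepB
        dsimp only
        rw [PySem.List.pyGetD_zero_cons, match_eq refL idx r.toList k w max_mismatch seed_min hw]
        by_cases hc : (pvBestMatch refL idx r.toList k w max_mismatch seed_min).1 = t ∧
            (pvBestMatch refL idx r.toList k w max_mismatch seed_min).2 ≤ max_mismatch
        · rw [if_pos hc, if_pos hc]
          obtain ⟨hb1, hb2⟩ := match_bounds refL idx r.toList k w max_mismatch seed_min hc.2
          have hcast : ((pvBestMatch refL idx r.toList k w max_mismatch seed_min).1.toNat : Int) =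
              (pvBestMatch refL idx r.toList k w max_mismatch seed_min).1 := by omega
          have hwr := write_eq r.toList (pvBestMatch refL idx r.toList k w max_mismatch seed_min).1.toNat rec
            (by simp at hb2 ⊢; omega)
          rw [hcast] at hwr
          rw [hwr]
        · rw [if_neg hc, if_neg hc]
      rw [hstep]
      -- shift the enumerate start and drop the consumed truth position
      set st' := pvStepB refL idx k w max_mismatch seed_min (rec, cnt) (r, t) with hst'
      have hcongr : (PySem.List.enumerate rs 0).foldl
            (fun st p => pvStepA refL idx (t :: ts') k w max_mismatch seed_min st (p.1 + 1, p.2)) st' =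
          (PySem.List.enumerate rs 0).foldl (pvStepA refL idx ts' k w max_mismatch seed_min) st' := by
        apply PySem.List.foldl_congr_mem
        intro acc p hp
        rw [PySem.List.mem_enumerate_iff] at hp
        obtain ⟨kk, hk, hpk⟩ := hp
        subst hpk
        unfold pvStepA
        dsimp only
        have : PySem.List.pyGetD (t :: ts') ((0 : Int) + kk + 1) 0 = PySem.List.pyGetD ts' ((0 : Int) + kk) 0 := by
          rw [show (0 : Int) + kk + 1 = ((kk + 1 : Nat) : Int) by push_cast; ring,
            show (0 : Int) + (kk : Int) = ((kk : Nat) : Int) by push_cast; ring,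
            PySem.List.pyGetD_natCast, PySem.List.pyGetD_natCast]
          simp
        rw [this]
      have hlen' : st'.1.length = refL.length := by
        rw [hst']
        unfold pvStepB
        dsimp only
        split_ifs with hc
        · obtain ⟨hb1, hb2⟩ := match_bounds refL idx r.toList k w max_mismatch seed_min hc.2
          simp only [List.length_append, List.length_take, List.length_drop, hrec]
          omega
        · exact hrec
      rw [enumerate_shift rs 0 1, List.foldl_map, hcongr]
      have := ih ts' st'.1 st'.2 (by simpa using hlen) hlen'
      simpa using this

-- ===== VERDICT (by name: the statement is the Claim_ definition above) =====
theorem reconstruct_genome_with_reads_spec : Claim_equal_reconstruct_genome_with_reads := by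
  intro reference reads truth_positions index k w max_mismatch seed_min _hDom hPre
  unfold Spec_reconstruct_genome_with_reads
  unfold reconstruct_genome_with_reads reconstruct_genome_with_reads_alt
  dsimp only
  obtain ⟨hlen, hw⟩ := hPre
  rcases hw with hnil | hw
  · subst hnil; rfl
  · rw [main_loop_eq _ _ _ _ _ _ hw _ _ _ _ hlen rfl]
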